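-- pv_equiv track=rewrite | github.com/Melchy1971/PDF-Wandler | sorter.py | _detect_supplier_with_hints
-- ===== SOURCE A (Python) =====
-- from typing import Any, Callable, Dict, Iterable, List, Optional, Sequence, Tuple
--
-- def _detect_supplier_with_hints(text: str, hints: Dict[str, Iterable[str]]) -> Optional[str]:
--     lower = text.lower()
--     best_supplier = None
--     best_score = -1
--     for supplier, supplier_hints in (hints or {}).items():
--         score = 0
--         for hint in supplier_hints or []:
--             if str(hint).lower() in lower:
--                 score += 1
--         if score > best_score and score > 0:
--             best_score = score
--             best_supplier = supplier
--     return best_supplier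
-- ===== SOURCE B (Python) =====
-- def _detect_supplier_with_hints(text, hints):
--     lower = text.lower()
--     items = list((hints or {}).items())
--     # Each distinct lowered hint is searched in the text ONCE, memoised in a dict.
--     present = {}
--     for _, supplier_hints in items:
--         for hint in supplier_hints or []:
--             key = str(hint).lower()
--             if key not in present:
--                 present[key] = key in lower
--     scored = [(sum(1 for hint in (hs or []) if present.get(str(hint).lower(), False)), s)
--               for s, hs in items]
--     best = max((sc for sc, _ in scored), default=0)
--     if best > 0:
--         for sc, s in scored:
--             if sc == best:
--                 return s
--     return None
-- ===== Notes on version B (the rewrite author's own statement) =====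
-- stated objective: alternative
-- what changed: B replaces A's running-best nested rescan with a memo dict that performs each distinct lowered hint's substring test exactly once, then materialises the score list and returns the first supplier attaining the maximum score.
import Mathlib
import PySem

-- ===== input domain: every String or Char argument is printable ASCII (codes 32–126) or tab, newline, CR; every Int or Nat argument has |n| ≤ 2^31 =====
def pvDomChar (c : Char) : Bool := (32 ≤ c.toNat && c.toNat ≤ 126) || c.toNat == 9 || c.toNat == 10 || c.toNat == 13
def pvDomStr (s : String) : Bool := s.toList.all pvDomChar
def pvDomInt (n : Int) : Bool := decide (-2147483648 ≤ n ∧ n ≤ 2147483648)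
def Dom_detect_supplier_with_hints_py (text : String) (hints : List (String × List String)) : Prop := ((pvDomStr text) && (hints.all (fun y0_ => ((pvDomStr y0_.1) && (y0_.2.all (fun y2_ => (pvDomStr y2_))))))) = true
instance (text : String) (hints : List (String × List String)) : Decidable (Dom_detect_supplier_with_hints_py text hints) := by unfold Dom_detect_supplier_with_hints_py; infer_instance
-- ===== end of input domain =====

-- B memoises each distinct lowered hint's substring test in a dict built once, then picks the
-- first supplier attaining the maximal score; same return value as A's running-best loop.

-- ===== PORT A =====
-- score of one supplier: the inner 'for hint in supplier_hints or []' loop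
def pvA_score (lower : String) (hs : List String) : Int :=
  hs.foldl (fun s h => if PySem.Str.isIn (PySem.Str.lower h) lower then s + 1 else s) 0

def detect_supplier_with_hints_py (text : String) (hints : List (String × List String)) : Option String :=
  let lower := PySem.Str.lower text
  (hints.foldl (fun (st : Option String × Int) p =>
      let score := pvA_score lower p.2
      if st.2 < score ∧ 0 < score then (some p.1, score) else st)
    (none, -1)).1

-- ===== PORT B =====
-- the memo dict: key = lowered hint, value = 'key in lower' computed once
def pvB_present (lower : String) (items : List (String × List String)) : PySem.Dict String Bool :=
  items.foldl (fun (d : PySem.Dict String Bool) p =>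
    p.2.foldl (fun d h =>
      let key := PySem.Str.lower h
      if d.contains key then d else d.insert key (PySem.Str.isIn key lower)) d)
    PySem.Dict.empty

def pvB_score (present : PySem.Dict String Bool) (hs : List String) : Int :=
  hs.foldl (fun s h => if present.getD (PySem.Str.lower h) false then s + 1 else s) 0

def detect_supplier_with_hints_py_alt (text : String) (hints : List (String × List String)) : Option String :=
  let lower := PySem.Str.lower text
  let present := pvB_present lower hints
  let scored : List (Int × String) := hints.map (fun p => (pvB_score present p.2, p.1))
  let best : Int :=
    match PySem.List.max? (scored.map Prod.fst) (fun (y : Int) => y) with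
    | none => 0
    | some m => m
  if (0:Int) < best then (scored.find? (fun p => p.1 == best)).map Prod.snd else none

-- ===== PRECONDITION & SPEC =====
def Spec_detect_supplier_with_hints_py (text : String) (hints : List (String × List String)) (out : Option String) : Prop := out = detect_supplier_with_hints_py_alt text hints
instance (text : String) (hints : List (String × List String)) (out : Option String) : Decidable (Spec_detect_supplier_with_hints_py text hints out) := by unfold Spec_detect_supplier_with_hints_py; infer_instance

-- ===== CLAIM (what is proved, stated in full; the proofs are below) =====
def Claim_equal_detect_supplier_with_hints_py : Prop := ∀ (text : String) (hints : List (String × List String)), Dom_detect_supplier_with_hints_py text hints → Spec_detect_supplier_with_hints_py text hints (detect_supplier_with_hints_py text hints)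

-- ===== LEMMAS AND PROOFS =====

-- A's outer-loop step, on the precomputed (score, supplier) list
def pvStep (st : Option String × Int) (p : Int × String) : Option String × Int :=
  if st.2 < p.1 ∧ 0 < p.1 then (some p.2, p.1) else st

-- every value stored in the memo dict is the substring test of its key
def pvGood (lower : String) (d : PySem.Dict String Bool) : Prop :=
  ∀ k b, d.get? k = some b → b = PySem.Str.isIn k lower

theorem pvGood_inner (lower : String) (hs : List String) :
    ∀ d, pvGood lower d →
      pvGood lower (hs.foldl (fun (d : PySem.Dict String Bool) h =>
        let key := PySem.Str.lower h
        if d.contains key then d else d.insert key (PySem.Str.isIn key lower)) d) := by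
  induction hs with
  | nil => intro d hd; simp only [List.foldl_nil]; exact hd
  | cons h t ih =>
    intro d hd
    simp only [List.foldl_cons]
    apply ih
    by_cases hc : d.contains (PySem.Str.lower h) = true
    · simpa [hc] using hd
    · simp only [hc]
      intro k b hk
      simp only [Bool.false_eq_true, if_false] at hk
      rw [PySem.Dict.get?_insert] at hk
      split at hk
      · next heq => subst heq; exact (Option.some_inj.mp hk).symm
      · exact hd k b hk

theorem pvGood_outer (lower : String) (items : List (String × List String)) :
    ∀ d, pvGood lower d →
      pvGood lower (items.foldl (fun (d : PySem.Dict String Bool) p =>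
        p.2.foldl (fun (d : PySem.Dict String Bool) h =>
          let key := PySem.Str.lower h
          if d.contains key then d else d.insert key (PySem.Str.isIn key lower)) d) d) := by
  induction items with
  | nil => intro d hd; simp only [List.foldl_nil]; exact hd
  | cons p t ih =>
    intro d hd
    simp only [List.foldl_cons]
    exact ih _ (pvGood_inner lower p.2 d hd)

theorem pvGood_build (lower : String) (items : List (String × List String)) :
    pvGood lower (pvB_present lower items) := by
  apply pvGood_outer
  intro k b hk
  simp [PySem.Dict.get?_empty] at hk

theorem pvContains_inner_mono (lower : String) (hs : List String) (k : String) :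
    ∀ d, d.contains k = true →
      (hs.foldl (fun (d : PySem.Dict String Bool) h =>
        let key := PySem.Str.lower h
        if d.contains key then d else d.insert key (PySem.Str.isIn key lower)) d).contains k = true := by
  induction hs with
  | nil => intro d hd; simp only [List.foldl_nil]; exact hd
  | cons h t ih =>
    intro d hd
    simp only [List.foldl_cons]
    apply ih
    by_cases hc : d.contains (PySem.Str.lower h) = true
    · simp only [hc, if_true]; exact hd
    · simp [hc, PySem.Dict.contains_insert, hd]

theorem pvContains_inner_self (lower : String) (hs : List String) (h : String) (hm : h ∈ hs) :
    ∀ d, (hs.foldl (fun (d : PySem.Dict String Bool) h =>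
        let key := PySem.Str.lower h
        if d.contains key then d else d.insert key (PySem.Str.isIn key lower)) d).contains (PySem.Str.lower h) = true := by
  induction hs with
  | nil => cases hm
  | cons h0 t ih =>
    intro d
    simp only [List.foldl_cons]
    rcases List.mem_cons.mp hm with heq | hmem
    · subst heq
      apply pvContains_inner_mono
      by_cases hc : d.contains (PySem.Str.lower h) = true
      · simp [hc]
      · simp [hc, PySem.Dict.contains_insert_self]
    · exact ih hmem _

theorem pvContains_outer_mono (lower : String) (items : List (String × List String)) (k : String) :
    ∀ d, d.contains k = true →
      (items.foldl (fun (d : PySem.Dict String Bool) p =>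
        p.2.foldl (fun (d : PySem.Dict String Bool) h =>
          let key := PySem.Str.lower h
          if d.contains key then d else d.insert key (PySem.Str.isIn key lower)) d) d).contains k = true := by
  induction items with
  | nil => intro d hd; simp only [List.foldl_nil]; exact hd
  | cons p t ih =>
    intro d hd
    simp only [List.foldl_cons]
    exact ih _ (pvContains_inner_mono lower p.2 k d hd)

theorem pvContains_outer_self (lower : String) (items : List (String × List String))
    (p : String × List String) (hp : p ∈ items) (h : String) (hh : h ∈ p.2) :
    ∀ d, (items.foldl (fun (d : PySem.Dict String Bool) p =>
        p.2.foldl (fun (d : PySem.Dict String Bool) h =>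
          let key := PySem.Str.lower h
          if d.contains key then d else d.insert key (PySem.Str.isIn key lower)) d) d).contains (PySem.Str.lower h) = true := by
  induction items generalizing p with
  | nil => cases hp
  | cons q t ih =>
    intro d
    simp only [List.foldl_cons]
    rcases List.mem_cons.mp hp with heq | hmem
    · subst heq
      exact pvContains_outer_mono lower t _ _ (pvContains_inner_self lower p.2 h hh _)
    · exact ih p hmem hh _

theorem pvContains_build (lower : String) (items : List (String × List String))
    (p : String × List String) (hp : p ∈ items) (h : String) (hh : h ∈ p.2) :
    (pvB_present lower items).contains (PySem.Str.lower h) = true :=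
  pvContains_outer_self lower items p hp h hh PySem.Dict.empty

theorem pvGetD_build (lower : String) (items : List (String × List String))
    (p : String × List String) (hp : p ∈ items) (h : String) (hh : h ∈ p.2) :
    (pvB_present lower items).getD (PySem.Str.lower h) false
      = PySem.Str.isIn (PySem.Str.lower h) lower := by
  have hc := pvContains_build lower items p hp h hh
  rw [PySem.Dict.contains_eq_isSome_get?] at hc
  rcases Option.isSome_iff_exists.mp hc with ⟨b, hb⟩
  rw [PySem.Dict.getD_eq_get?_getD, hb]
  exact pvGood_build lower items _ _ hb

theorem pvFoldl_ite_congr (cond1 cond2 : String → Bool) (hs : List String)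
    (hcd : ∀ h ∈ hs, cond1 h = cond2 h) :
    ∀ (s : Int), hs.foldl (fun s h => if cond1 h then s + 1 else s) s
      = hs.foldl (fun s h => if cond2 h then s + 1 else s) s := by
  induction hs with
  | nil => intro s; rfl
  | cons h t ih =>
    intro s
    simp only [List.foldl_cons, hcd h (List.mem_cons_self)]
    exact ih (fun x hx => hcd x (List.mem_cons_of_mem _ hx)) _

theorem pvB_score_eq (lower : String) (items : List (String × List String))
    (p : String × List String) (hp : p ∈ items) :
    pvB_score (pvB_present lower items) p.2 = pvA_score lower p.2 := by
  unfold pvB_score pvA_score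
  exact pvFoldl_ite_congr _ _ p.2
    (fun h hh => pvGetD_build lower items p hp h hh) 0

theorem pvFoldl_score_mono (cond : String → Bool) (hs : List String) :
    ∀ (t : Int), t ≤ hs.foldl (fun s h => if cond h then s + 1 else s) t := by
  induction hs with
  | nil => intro t; simp
  | cons h t ih =>
    intro s
    simp only [List.foldl_cons]
    refine le_trans ?_ (ih _)
    split <;> omega

theorem pvA_score_nonneg (lower : String) (hs : List String) : 0 ≤ pvA_score lower hs :=
  pvFoldl_score_mono _ hs 0

-- the running-best loop equals "max, then first element attaining it"
theorem pvLoop_spec (l : List (Int × String)) :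
    ∀ (sb : Option String) (m : Int), ((m = -1 ∧ sb = none) ∨ 1 ≤ m) →
      l.foldl pvStep (sb, m) =
        (if max m 0 < l.foldl (fun a p => max a p.1) (max m 0) then
          match l.find? (fun p => p.1 == l.foldl (fun a p => max a p.1) (max m 0)) with
          | some q => (some q.2, l.foldl (fun a p => max a p.1) (max m 0))
          | none => (sb, m)
        else (sb, m)) := by
  induction l with
  | nil => intro sb m _; simp
  | cons p t ih =>
    intro sb m hm
    have hT : (0 : Int) ≤ max m 0 := le_max_right m 0
    simp only [List.foldl_cons]
    by_cases hc : max m 0 < p.1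
    · -- the head strictly improves: state becomes (some p.2, p.1)
      have hcond : (m < p.1 ∧ 0 < p.1) := by
        rcases hm with ⟨hm1, _⟩ | hm1 <;> constructor <;> omega
      have hmax : max (max m 0) p.1 = p.1 := by omega
      have hmax2 : max p.1 0 = p.1 := by omega
      rw [show pvStep (sb, m) p = (some p.2, p.1) by simp [pvStep, hcond]]
      rw [ih (some p.2) p.1 (Or.inr (by omega))]
      rw [hmax, hmax2]
      set M := t.foldl (fun a p => max a p.1) p.1 with hM
      have hpM : p.1 ≤ M := (PySem.List.le_foldl_max_int t Prod.fst p.1).1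
      by_cases hlt : p.1 < M
      · -- the maximum lies strictly in the tail
        have hne : (p.1 == M) = false := by simp; omega
        have hfind : (t.find? (fun q => q.1 == M)).isSome := by
          have : M ∈ t.map Prod.fst := by
            have := PySem.List.foldl_max_mem (t.map Prod.fst) p.1
            rw [List.foldl_map] at this
            rcases this with h1 | h1
            · omega
            · exact h1
          rcases List.mem_map.mp this with ⟨q, hq, hq1⟩
          rw [List.find?_isSome]
          exact ⟨q, hq, by simp [hq1]⟩
        rcases Option.isSome_iff_exists.mp hfind with ⟨q, hq⟩
        simp only [List.find?_cons, hne, hlt, if_true, hq]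
        rw [if_pos (by omega : max m 0 < M)]
      · have hMe : M = p.1 := le_antisymm (by omega) hpM
        simp only [hc, if_true, List.find?_cons, hMe]
        simp
    · -- the head does not improve: state unchanged
      have hcond : ¬ (m < p.1 ∧ 0 < p.1) := by
        rcases hm with ⟨hm1, _⟩ | hm1 <;> omega
      have hmax : max (max m 0) p.1 = max m 0 := by omega
      rw [show pvStep (sb, m) p = (sb, m) by simp [pvStep]; omega]
      rw [ih sb m hm]
      rw [hmax]
      set M := t.foldl (fun a p => max a p.1) (max m 0) with hM
      have hTM : max m 0 ≤ M := (PySem.List.le_foldl_max_int t Prod.fst (max m 0)).1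
      by_cases hlt : max m 0 < M
      · have hne : (p.1 == M) = false := by simp; omega
        simp only [hlt, if_true, List.find?_cons, hne]
      · simp [hlt]

-- ===== VERDICT (by name: the statement is the Claim_ definition above) =====
theorem detect_supplier_with_hints_py_spec : Claim_equal_detect_supplier_with_hints_py := by
  intro text hints _
  unfold Spec_detect_supplier_with_hints_py detect_supplier_with_hints_py detect_supplier_with_hints_py_alt
  simp only []
  set lower := PySem.Str.lower text with hlow
  -- B's scored list has A's scores
  have hscored : hints.map (fun p => (pvB_score (pvB_present lower hints) p.2, p.1))
      = hints.map (fun p => (pvA_score lower p.2, p.1)) := by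
    apply List.map_congr_left
    intro p hp
    rw [pvB_score_eq lower hints p hp]
  rw [hscored]
  set scored : List (Int × String) := hints.map (fun p => (pvA_score lower p.2, p.1)) with hsc
  -- A's fold over hints is pvStep over the scored list
  have hA : (hints.foldl (fun (st : Option String × Int) p =>
      let score := pvA_score lower p.2
      if st.2 < score ∧ 0 < score then (some p.1, score) else st) (none, -1))
      = scored.foldl pvStep (none, -1) := by
    rw [hsc, List.foldl_map]
    rfl
  rw [hA, pvLoop_spec scored none (-1) (Or.inl ⟨rfl, rfl⟩)]
  -- B's 'best' is the fold max with seed 0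
  have hnn : ∀ q ∈ scored, (0 : Int) ≤ q.1 := by
    intro q hq
    rcases List.mem_map.mp hq with ⟨p, _, rfl⟩
    exact pvA_score_nonneg lower p.2
  have hbest : (match PySem.List.max? (scored.map Prod.fst) (fun (y : Int) => y) with
      | none => (0 : Int)
      | some m => m) = scored.foldl (fun a p => max a p.1) (max (-1) 0) := by
    cases hscc : scored with
    | nil => simp [PySem.List.max?]
    | cons q t =>
      rw [List.map_cons, PySem.List.max?_id_cons]
      have h0q : max ((-1 : Int)) 0 = 0 := by omega
      have hq0 : (0 : Int) ≤ q.1 := hnn q (by rw [hscc]; exact List.mem_cons_self)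
      simp only [List.foldl_cons, h0q]
      rw [show max (0 : Int) q.1 = q.1 by omega]
      rw [List.foldl_map]
  rw [hbest]
  set M := scored.foldl (fun a p => max a p.1) (max (-1) 0) with hMdef
  rw [show max ((-1):Int) 0 = 0 from by omega] at *
  by_cases hlt : (0 : Int) < M
  · simp only [hlt, if_true]
    cases hf : scored.find? (fun p => p.1 == M) with
    | none => simp
    | some q => simp
  · simp [hlt]
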